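-- pv_equiv track=rewrite | github.com/killreal777/Informatics | StringTools.py | search_in_unquoted_area
-- ===== SOURCE A (Python) =====
-- def search_in_unquoted_area(line, symbol):
--     double_quote_opened = False
--     single_quote_opened = False
--     match_indexes = []
--     for i in range(len(line)):
--         if line[i] == '"':
--             double_quote_opened = not double_quote_opened
--         if line[i] == "'":
--             single_quote_opened = not single_quote_opened
--         if line[i] == symbol and not double_quote_opened and not single_quote_opened:
--             match_indexes.append(i)
--     return match_indexes
-- ===== SOURCE B (Python) =====
-- def search_in_unquoted_area(line, symbol):
--     # Pass 1: per-index post-toggle "inside any quote" mask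
--     mask = []
--     dq = False
--     sq = False
--     for ch in line:
--         if ch == '"':
--             dq = not dq
--         if ch == "'":
--             sq = not sq
--         mask.append(dq or sq)
--     # Pass 2: filter indexes by symbol match and mask
--     return [i for i, (ch, m) in enumerate(zip(line, mask)) if ch == symbol and not m]
-- ===== Notes on version B (the rewrite author's own statement) =====
-- stated objective: alternative
-- what changed: Splits A's interleaved quote-state machine into two passes: one pass builds a per-index inside-quote mask, a second comprehension filters indexes by symbol match against that mask.
import Mathlib
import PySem

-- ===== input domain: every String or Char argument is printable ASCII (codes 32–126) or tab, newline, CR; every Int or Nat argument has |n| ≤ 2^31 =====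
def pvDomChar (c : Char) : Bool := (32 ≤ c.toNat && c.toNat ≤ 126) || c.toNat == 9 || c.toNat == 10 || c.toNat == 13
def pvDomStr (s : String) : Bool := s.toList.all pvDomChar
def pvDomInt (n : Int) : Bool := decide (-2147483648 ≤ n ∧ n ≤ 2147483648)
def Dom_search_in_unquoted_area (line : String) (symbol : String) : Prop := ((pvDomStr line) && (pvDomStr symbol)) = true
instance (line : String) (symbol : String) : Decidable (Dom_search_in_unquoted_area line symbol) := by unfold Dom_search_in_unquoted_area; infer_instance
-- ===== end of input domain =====

-- B replaces A's single interleaved quote-state loop by two passes (build a per-index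
-- inside-quote mask, then filter indexes against it); same cost, different decomposition.

-- ===== PORT A =====
-- A's single loop: per character, toggle the two quote flags, then record the index on match.
def pvAGo (symbol : String) : List Char → Int → Bool → Bool → List Int
  | [], _, _, _ => []
  | c :: cs, i, dq, sq =>
    let dq' := if c = '"' then !dq else dq
    let sq' := if c = '\'' then !sq else sq
    let rest := pvAGo symbol cs (i + 1) dq' sq'
    if String.mk [c] = symbol ∧ !dq' = true ∧ !sq' = true then i :: rest else rest

def search_in_unquoted_area (line : String) (symbol : String) : List Int :=
  pvAGo symbol line.toList 0 false false

-- ===== PORT B =====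
-- Pass 1: post-toggle "inside any quote" mask per index.
def pvMask : List Char → Bool → Bool → List Bool
  | [], _, _ => []
  | c :: cs, dq, sq =>
    let dq' := if c = '"' then !dq else dq
    let sq' := if c = '\'' then !sq else sq
    (dq' || sq') :: pvMask cs dq' sq'

-- Pass 2: the comprehension over enumerate(zip(line, mask)).
def pvFilter (symbol : String) : List (Char × Bool) → Int → List Int
  | [], _ => []
  | (c, m) :: rest, i =>
    let tail := pvFilter symbol rest (i + 1)
    if String.mk [c] = symbol ∧ m = false then i :: tail else tail

def search_in_unquoted_area_alt (line : String) (symbol : String) : List Int :=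
  pvFilter symbol (line.toList.zip (pvMask line.toList false false)) 0

-- ===== PRECONDITION & SPEC =====
def Spec_search_in_unquoted_area (line : String) (symbol : String) (out : List Int) : Prop := out = search_in_unquoted_area_alt line symbol
instance (line : String) (symbol : String) (out : List Int) : Decidable (Spec_search_in_unquoted_area line symbol out) := by unfold Spec_search_in_unquoted_area; infer_instance

-- ===== CLAIM (what is proved, stated in full; the proofs are below) =====
def Claim_equal_search_in_unquoted_area : Prop := ∀ (line : String) (symbol : String), Dom_search_in_unquoted_area line symbol → Spec_search_in_unquoted_area line symbol (search_in_unquoted_area line symbol)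

-- ===== LEMMAS AND PROOFS =====
theorem pvAGo_eq_filter_mask (symbol : String) (cs : List Char) :
    ∀ (i : Int) (dq sq : Bool),
      pvAGo symbol cs i dq sq = pvFilter symbol (cs.zip (pvMask cs dq sq)) i := by
  induction cs with
  | nil => intro i dq sq; rfl
  | cons c cs ih =>
    intro i dq sq
    simp only [pvAGo, pvMask, List.zip_cons_cons, pvFilter, ih]
    by_cases hdq : c = '"' <;> by_cases hsq : c = '\'' <;>
      simp [hdq, hsq]

-- ===== VERDICT (by name: the statement is the Claim_ definition above) =====
theorem search_in_unquoted_area_spec : Claim_equal_search_in_unquoted_area := by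
  intro line symbol _
  unfold Spec_search_in_unquoted_area search_in_unquoted_area search_in_unquoted_area_alt
  exact pvAGo_eq_filter_mask symbol line.toList 0 false false
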